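-- pv_equiv track=rewrite | github.com/aww/adventofcode | 2025/day06_trash_compactor.py | docolmath
-- ===== SOURCE A (Python) =====
-- def docolmath(cols: list[str], ops: list[str]) -> int:
--     iop = 0
--     grandtotal = 0
--     problemtotal = 0
--     if ops[0] == "*":
--         problemtotal = 1
--     for txt in cols:
--         if txt.strip() == "":
--             grandtotal += problemtotal
--             iop += 1
--             problemtotal = 0
--             if ops[iop] == "*":
--                 problemtotal = 1
--         else:
--             if ops[iop] == "+":
--                 problemtotal += int(txt)
--             elif ops[iop] == "*":
--                 problemtotal *= int(txt)
--             else: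
--                 raise ValueError(f"Unrecognized operator '{ops[iop]}'")
--     grandtotal += problemtotal
--     if iop >= len(ops):
--         raise ValueError("Found more column groups than operators")
--     return grandtotal
-- ===== SOURCE B (Python) =====
-- def docolmath(cols: list[str], ops: list[str]) -> int:
--     # split the columns into blank-separated groups, then fold each group with its operator:
--     # product for '*', sum otherwise
--     groups = [[]]
--     for txt in cols:
--         if txt.strip() == "":
--             groups.append([])
--         else:
--             groups[-1].append(txt)
--     total = 0
--     for g, op in zip(groups, ops):
--         nums = [int(t) for t in g]
--         if op == "*":
--             p = 1
--             for n in nums: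
--                 p *= n
--             total += p
--         else:
--             total += sum(nums)
--     return total
-- ===== Notes on version B (the rewrite author's own statement) =====
-- stated objective: alternative
-- what changed: B first splits the columns into blank-separated groups and then folds each group with its operator (product for '*', sum otherwise), instead of A's single pass carrying operator-index/grand-total/running-value state.
import Mathlib
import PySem

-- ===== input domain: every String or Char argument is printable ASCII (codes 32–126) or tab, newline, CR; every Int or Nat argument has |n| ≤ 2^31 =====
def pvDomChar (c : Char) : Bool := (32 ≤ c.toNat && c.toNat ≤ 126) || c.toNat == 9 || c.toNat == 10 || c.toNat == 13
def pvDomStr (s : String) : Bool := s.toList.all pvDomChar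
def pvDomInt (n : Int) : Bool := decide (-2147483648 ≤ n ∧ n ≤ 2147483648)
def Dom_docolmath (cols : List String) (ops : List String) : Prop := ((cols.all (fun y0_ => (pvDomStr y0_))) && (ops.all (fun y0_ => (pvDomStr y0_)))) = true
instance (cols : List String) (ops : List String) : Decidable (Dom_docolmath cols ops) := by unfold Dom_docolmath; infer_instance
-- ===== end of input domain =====

-- B splits the columns into blank-separated groups first and then folds one aggregate per group
-- (different decomposition, same cost); equivalence is about return values (neither mutates its arguments).

-- ===== PORT A =====
-- state (iop, grandtotal, problemtotal); where Python raises (ValueError/IndexError) Pre_ excludes the input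
def pvStepA (ops : List String) (s : Int × Int × Int) (txt : String) : Int × Int × Int :=
  if PySem.Str.strip txt = "" then
    let i := s.1 + 1
    (i, s.2.1 + s.2.2, if PySem.List.pyGetD ops i "" = "*" then (1 : Int) else 0)
  else
    let op := PySem.List.pyGetD ops s.1 ""
    if op = "+" then (s.1, s.2.1, s.2.2 + (PySem.Int.ofStr? txt).getD 0)
    else if op = "*" then (s.1, s.2.1, s.2.2 * (PySem.Int.ofStr? txt).getD 0)
    else (s.1, s.2.1, s.2.2)  -- Python: raise ValueError (excluded by Pre_)

def docolmath (cols : List String) (ops : List String) : Int :=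
  let st := cols.foldl (pvStepA ops)
    ((0 : Int), (0 : Int), if PySem.List.pyGetD ops (0 : Int) "" = "*" then (1 : Int) else 0)
  st.2.1 + st.2.2

-- ===== PORT B =====
def pvParse (t : String) : Int := (PySem.Int.ofStr? t).getD 0  -- int(t); Pre_ excludes ValueError

-- groups with a modifiable last element, represented as (finished groups, current last group)
def pvStepSplit (s : List (List String) × List String) (txt : String) : List (List String) × List String :=
  if PySem.Str.strip txt = "" then (s.1 ++ [s.2], []) else (s.1, s.2 ++ [txt])

-- the body of B's per-group loop iteration: product for "*", sum otherwise
def pvGroupVal (op : String) (g : List String) : Int :=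
  let nums := g.map pvParse
  if op = "*" then nums.foldl (fun p n => p * n) 1 else nums.sum

def docolmath_alt (cols : List String) (ops : List String) : Int :=
  let sp := cols.foldl pvStepSplit ([], [])
  let groups := sp.1 ++ [sp.2]
  (groups.zip ops).foldl (fun total p => total + pvGroupVal p.2 p.1) 0

-- ===== PRECONDITION & SPEC =====
-- (head group, remaining groups) of cols split at blank entries — used only to state Pre_/Raises_
def pvSplit : List String → List String × List (List String)
  | [] => ([], [])
  | t :: r =>
    let p := pvSplit r
    if PySem.Str.strip t = "" then ([], p.1 :: p.2) else (t :: p.1, p.2)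

def pvGroups (cols : List String) : List (List String) :=
  (pvSplit cols).1 :: (pvSplit cols).2

-- Pre_ = exactly the inputs on which Python A returns: ops nonempty, at most as many column groups as
-- operators (else IndexError), and every nonempty group has operator "+" or "*" (else ValueError) with
-- every member parseable by int() (else ValueError).
def Pre_docolmath (cols : List String) (ops : List String) : Prop :=
  ops ≠ [] ∧ (pvGroups cols).length ≤ ops.length ∧
  ∀ p ∈ PySem.List.enumerate (pvGroups cols) 0,
    p.2 = [] ∨ (ops.getD p.1.toNat "" ∈ (["+", "*"] : List String) ∧
                ∀ t ∈ p.2, (PySem.Int.ofStr? t).isSome)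
instance (cols : List String) (ops : List String) : Decidable (Pre_docolmath cols ops) := by
  unfold Pre_docolmath; infer_instance

def pvWitness_docolmath : List String × List String := (["1", " ", "2", "3"], ["+", "*"])

def Spec_docolmath (cols : List String) (ops : List String) (out : Int) : Prop := out = docolmath_alt cols ops
instance (cols : List String) (ops : List String) (out : Int) : Decidable (Spec_docolmath cols ops out) := by unfold Spec_docolmath; infer_instance

-- ===== CLAIM (what is proved, stated in full; the proofs are below) =====
def Claim_equal_docolmath : Prop := ∀ (cols : List String) (ops : List String), Dom_docolmath cols ops → Pre_docolmath cols ops → Spec_docolmath cols ops (docolmath cols ops)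

-- ===== LEMMAS AND PROOFS =====
def stepOp (op : String) (p : Int) (t : String) : Int :=
  if op = "+" then p + pvParse t else if op = "*" then p * pvParse t else p

def initOp (op : String) : Int := if op = "*" then 1 else 0

def contribOp (op : String) (g : List String) : Int :=
  if op = "+" then (g.map pvParse).sum
  else if op = "*" then g.foldl (fun p x => p * pvParse x) 1
  else 0

def sumContrib (ops : List String) (i : Int) : List (List String) → Int
  | [] => 0
  | g :: gs => contribOp (PySem.List.pyGetD ops i "") g + sumContrib ops (i + 1) gs

def sumContribB : List (List String) → List String → Int
  | [], _ => 0
  | _ :: _, [] => 0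
  | g :: gs, o :: os => pvGroupVal o g + sumContribB gs os

theorem foldl_add_parse (g : List String) (a : Int) :
    g.foldl (fun p t => p + pvParse t) a = a + (g.map pvParse).sum := by
  induction g generalizing a with
  | nil => simp
  | cons t r ih => simp [List.foldl_cons, ih]; ring

theorem evalGroup_init (op : String) (g : List String) :
    g.foldl (stepOp op) (initOp op) = contribOp op g := by
  by_cases h1 : op = "+"
  · subst h1
    have e : stepOp "+" = fun p t => p + pvParse t := by
      funext p t; simp [stepOp]
    rw [e, foldl_add_parse]
    simp [contribOp, initOp]
  · by_cases h2 : op = "*"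
    · subst h2
      have e : stepOp "*" = fun p x => p * pvParse x := by
        funext p x; simp [stepOp]
      rw [e]
      simp [contribOp, initOp]
    · have e : stepOp op = fun p (_ : String) => p := by
        funext p t; simp [stepOp, h1, h2]
      simp [contribOp, initOp, h1, h2, e]

theorem foldA_eval (ops : List String) (cols : List String) :
    ∀ (i gt pt : Int),
      (cols.foldl (pvStepA ops) (i, gt, pt)).2.1 + (cols.foldl (pvStepA ops) (i, gt, pt)).2.2
        = gt + (pvSplit cols).1.foldl (stepOp (PySem.List.pyGetD ops i "")) pt
            + sumContrib ops (i + 1) (pvSplit cols).2 := by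
  induction cols with
  | nil => intro i gt pt; simp [pvSplit, sumContrib]
  | cons t r ih =>
    intro i gt pt
    by_cases hb : PySem.Str.strip t = ""
    · have hstep : pvStepA ops (i, gt, pt) t
          = (i + 1, gt + pt, initOp (PySem.List.pyGetD ops (i + 1) "")) := by
        simp [pvStepA, hb, initOp]
      simp only [List.foldl_cons, hstep]
      rw [ih]
      simp [pvSplit, hb, sumContrib, evalGroup_init]
      ring
    · have hstep : pvStepA ops (i, gt, pt) t
          = (i, gt, stepOp (PySem.List.pyGetD ops i "") pt t) := by
        simp only [pvStepA, stepOp]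
        rw [if_neg hb]
        split_ifs <;> rfl
      simp only [List.foldl_cons, hstep]
      rw [ih]
      simp [pvSplit, hb, List.foldl_cons]

theorem foldSplit_eval (cols : List String) :
    ∀ (acc : List (List String)) (cur : List String),
      (cols.foldl pvStepSplit (acc, cur)).1 ++ [(cols.foldl pvStepSplit (acc, cur)).2]
        = acc ++ (cur ++ (pvSplit cols).1) :: (pvSplit cols).2 := by
  induction cols with
  | nil => intro acc cur; simp [pvSplit]
  | cons t r ih =>
    intro acc cur
    by_cases hb : PySem.Str.strip t = ""
    · simp only [List.foldl_cons, pvStepSplit, hb, if_true]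
      rw [ih]
      simp [pvSplit, hb]
    · simp only [List.foldl_cons, pvStepSplit, hb]
      rw [ih]
      simp [pvSplit, hb]

theorem foldZip_eval (gs : List (List String)) :
    ∀ (os : List String) (total : Int),
      ((gs.zip os).foldl (fun total p => total + pvGroupVal p.2 p.1) total)
        = total + sumContribB gs os := by
  induction gs with
  | nil => intro os total; simp [sumContribB]
  | cons g r ih =>
    intro os total
    cases os with
    | nil => simp [sumContribB]
    | cons o os' =>
      simp only [List.zip_cons_cons, List.foldl_cons, sumContribB]
      rw [ih]
      ring

theorem contrib_eq (op : String) (g : List String)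
    (h : op ∈ (["+", "*"] : List String) ∨ g = []) : contribOp op g = pvGroupVal op g := by
  by_cases h2 : op = "*"
  · subst h2
    simp [contribOp, pvGroupVal, List.foldl_map]
  · by_cases h1 : op = "+"
    · subst h1
      simp [contribOp, pvGroupVal]
    · rcases h with h | h
      · simp [h1, h2] at h
      · subst h
        simp [contribOp, pvGroupVal, h1, h2]

theorem sumContrib_eq (ops : List String) (gs : List (List String)) :
    ∀ (n : Nat), n + gs.length ≤ ops.length →
      (∀ p ∈ PySem.List.enumerate gs (n : Int),
        ops.getD p.1.toNat "" ∈ (["+", "*"] : List String) ∨ p.2 = []) →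
      sumContrib ops (n : Int) gs = sumContribB gs (ops.drop n) := by
  induction gs with
  | nil => intro n _ _; simp [sumContrib, sumContribB]
  | cons g r ih =>
    intro n hlen hops
    have hn : n < ops.length := by simp at hlen; omega
    have hdrop : ops.drop n = ops[n] :: ops.drop (n + 1) := List.drop_eq_getElem_cons hn
    have hge : PySem.List.pyGetD ops (n : Int) "" = ops[n] := by
      simp [PySem.List.pyGetD_natCast, List.getD_eq_getElem?_getD, List.getElem?_eq_getElem hn]
    have hmem : ((n : Int), g) ∈ PySem.List.enumerate (g :: r) (n : Int) := by
      simp [PySem.List.enumerate_cons]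
    have hc : contribOp ops[n] g = pvGroupVal ops[n] g := by
      apply contrib_eq
      have := hops _ hmem
      simpa [List.getD_eq_getElem?_getD, List.getElem?_eq_getElem hn] using this
    have hrest : sumContrib ops ((n : Int) + 1) r = sumContribB r (ops.drop (n + 1)) := by
      have : ((n : Int) + 1) = ((n + 1 : Nat) : Int) := by push_cast; ring
      rw [this]
      apply ih
      · simp at hlen ⊢; omega
      · intro p hp
        apply hops
        have hc1 : (((n : Nat) : Int) + 1) = ((n + 1 : Nat) : Int) := by push_cast; ring
        rw [PySem.List.enumerate_cons]
        exact List.mem_cons_of_mem _ (by rw [hc1]; exact hp)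
    simp only [sumContrib, hdrop, sumContribB, hge, hc, hrest]

theorem docolmath_eq (cols ops : List String) (hpre : Pre_docolmath cols ops) :
    docolmath cols ops = docolmath_alt cols ops := by
  obtain ⟨-, hlen, hops⟩ := hpre
  show (cols.foldl (pvStepA ops) _).2.1 + (cols.foldl (pvStepA ops) _).2.2 = _
  rw [foldA_eval ops cols 0 0 _]
  have h0 : (if PySem.List.pyGetD ops (0 : Int) "" = "*" then (1 : Int) else 0)
      = initOp (PySem.List.pyGetD ops (0 : Int) "") := rfl
  rw [h0, evalGroup_init]
  have hA : (0 : Int) + contribOp (PySem.List.pyGetD ops 0 "") (pvSplit cols).1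
      + sumContrib ops (0 + 1) (pvSplit cols).2 = sumContrib ops ((0 : Nat) : Int) (pvGroups cols) := by
    simp [pvGroups, sumContrib]
  rw [hA]
  have hB : docolmath_alt cols ops = sumContribB (pvGroups cols) ops := by
    unfold docolmath_alt
    have hsp := foldSplit_eval cols [] []
    simp only [List.nil_append] at hsp
    have hzip : ((cols.foldl pvStepSplit ([], [])).1 ++ [(cols.foldl pvStepSplit ([], [])).2]).zip ops
        = (pvGroups cols).zip ops := by rw [hsp]; rfl
    simp only [hzip, foldZip_eval]
    ring
  rw [hB]
  have := sumContrib_eq ops (pvGroups cols) 0 (by simpa using hlen)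
    (by
      intro p hp
      rcases hops p (by simpa using hp) with h | h
      · right; exact h
      · left; exact h.1)
  simpa using this

-- ===== VERDICT (by name: the statement is the Claim_ definition above) =====
theorem docolmath_spec : Claim_equal_docolmath := by
  intro cols ops _ hpre
  unfold Spec_docolmath
  exact docolmath_eq cols ops hpre
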